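-- pv_equiv track=rewrite | github.com/Lancher/coding-challenge | *interview/amazon/equal_substring.py | equal_substring1
-- ===== SOURCE A (Python) =====
-- def equal_substring1(s, k):
--     # initialization
--     n = len(s)
--     i, j = 0, 0
--     cnt = [0] * 26
--
--     # max length
--     res = 0
--
--     # count distinct characters
--     def count_distinct():
--         total = 0
--         for num in cnt:
--             if num:
--                 total += 1
--         return total
--
--     #
--     for i in range(n):
--         # j goes to right as much as possible
--         while j < n:
--             distinct_cnt = count_distinct()
--             if distinct_cnt == k:
--                 if cnt[ord(s[j])-ord('a')]:
--                     cnt[ord(s[j]) - ord('a')] += 1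
--                     j += 1
--                 else:
--                     break
--             elif distinct_cnt < k:
--                 cnt[ord(s[j]) - ord('a')] += 1
--                 j += 1
--
--         # update max length
--         res += j - i
--
--         # decrease cnt if possible
--         cnt[ord(s[i]) - ord('a')] -= 1
--
--     return res
-- ===== SOURCE B (Python) =====
-- def equal_substring1(s, k):
--     # right-anchored scan: keep each window char's LAST occurrence index; on
--     # overflow evict the char with the smallest last occurrence and jump left past it
--     last = {}
--     left = 0
--     res = 0
--     for r in range(len(s)):
--         last[s[r]] = r
--         if len(last) > k:
--             m = min(last.values())
--             del last[s[m]]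
--             left = m + 1
--         res += r - left + 1
--     return res
-- ===== Notes on version B (the rewrite author's own statement) =====
-- stated objective: faster
-- what changed: Replaces the left-anchored frequency-count window (26-slot count array rescanned by count_distinct on every inner-loop step, counts incremented/decremented as the window moves) with a right-anchored single pass that keeps only each window character's LAST occurrence index in a dict and, when a (k+1)-th distinct character arrives, evicts the minimum last occurrence and jumps the left edge past it - no frequency counts and no inner extend loop; intended faster by a constant factor: the O(26) rescan per step disappears.
-- outside the precondition, e.g. on equal_substring1('`z', 1): A returns 3, B returns 2; on equal_substring1('A', 1): A raises IndexError, B returns 1; on equal_substring1('ab', 0): A does not finish within the time limit, B returns 0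
import Mathlib
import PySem

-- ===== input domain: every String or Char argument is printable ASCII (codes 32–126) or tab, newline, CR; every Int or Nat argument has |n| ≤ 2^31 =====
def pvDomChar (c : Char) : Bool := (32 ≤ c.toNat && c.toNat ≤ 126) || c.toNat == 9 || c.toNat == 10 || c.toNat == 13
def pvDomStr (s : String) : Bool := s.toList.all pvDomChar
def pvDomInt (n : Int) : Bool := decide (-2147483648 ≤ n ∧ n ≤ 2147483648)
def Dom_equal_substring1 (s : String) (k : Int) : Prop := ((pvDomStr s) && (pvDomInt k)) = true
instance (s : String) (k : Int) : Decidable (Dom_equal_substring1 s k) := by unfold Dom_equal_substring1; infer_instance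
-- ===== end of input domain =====

-- B replaces A's left-anchored frequency-count window (26-slot array rescanned by
-- count_distinct on every inner step) with a right-anchored scan keeping only each window
-- character's last occurrence index in a dict, evicting the minimum on overflow: no
-- frequency counts and no inner extend loop (intended faster: the O(26) rescan disappears).

-- ===== PORT A =====
-- count_distinct(): scans the whole cnt array, counting nonzero entries ('if num:' is num ≠ 0)
def eqsA_cd (cnt : List Int) : Int :=
  cnt.foldl (fun total num => if num ≠ 0 then total + 1 else total) 0

-- the inner 'while j < n' loop; cnt[ord(s[j])-ord('a')] reads/writes use the total pyGetD/pySetD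
-- forms (exact on indices in range, i.e. under Pre_; outside it Python raises IndexError);
-- the distinct_cnt > k case falls through Python's if/elif and loops forever — unreachable under Pre_
-- (fuel = n - j only counts the remaining loop iterations, so the recursion is structural
-- and the kernel can evaluate it; the loop itself is unchanged)
def eqsA_inner (l : List Char) (k : Int) (cnt : List Int) (j fuel : Nat) : Nat × List Int :=
  match fuel with
  | 0 => (j, cnt)
  | fuel + 1 =>
    if j < l.length then
      let d := eqsA_cd cnt
      if d = k then
        let e : Int := ((l.getD j ' ').toNat : Int) - 97
        if PySem.List.pyGetD cnt e 0 ≠ 0 then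
          eqsA_inner l k (PySem.List.pySetD cnt e (PySem.List.pyGetD cnt e 0 + 1)) (j + 1) fuel
        else (j, cnt)
      else if d < k then
        let e : Int := ((l.getD j ' ').toNat : Int) - 97
        eqsA_inner l k (PySem.List.pySetD cnt e (PySem.List.pyGetD cnt e 0 + 1)) (j + 1) fuel
      else (j, cnt)
    else (j, cnt)

def equal_substring1 (s : String) (k : Int) : Int :=
  let l := s.toList
  let n := l.length
  let st := (List.range n).foldl (fun (st : Nat × List Int × Int) (i : Nat) =>
      let (j, cnt, res) := st
      let (j', cnt') := eqsA_inner l k cnt j (l.length - j)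
      let res' := res + ((j' : Int) - (i : Int))
      let e : Int := ((l.getD i ' ').toNat : Int) - 97
      (j', PySem.List.pySetD cnt' e (PySem.List.pyGetD cnt' e 0 - 1), res'))
    (0, List.replicate 26 (0 : Int), (0 : Int))
  st.2.2

-- ===== PORT B =====
-- right-anchored scan: last[c] = c's last occurrence index; on overflow (len(last) > k) evict
-- the key with the minimum last occurrence and jump left past it.  s[r] is in range (r < n);
-- min(last.values()) is over a provably nonempty list (Python would raise on empty: .getD 0 is
-- unreachable); s[m] uses pyGetD, exact since 0 ≤ m < n.
def equal_substring1_alt (s : String) (k : Int) : Int :=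
  let l := s.toList
  ((List.range l.length).foldl (fun (st : PySem.Dict Char Int × Int × Int) (r : Nat) =>
      let (last, left, res) := st
      let last1 := last.insert (l.getD r ' ') ((r : Nat) : Int)
      let p : PySem.Dict Char Int × Int :=
        if k < (last1.size : Int) then
          let m := (PySem.List.min? last1.values (fun v => v)).getD 0
          (last1.erase (PySem.List.pyGetD l m ' '), m + 1)
        else (last1, left)
      (p.1, p.2, res + (r : Int) - p.2 + 1))
    (PySem.Dict.empty, 0, 0)).2.2

-- ===== PRECONDITION & SPEC =====
-- Pre_ excludes k ≤ 0, where A loops forever, and strings with characters outside 'a'..'z',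
-- where A raises IndexError (codes < 71 or > 122) or, for codes 71..96, silently wraps to a
-- negative cnt index, aliasing distinct characters.
def Pre_equal_substring1 (s : String) (k : Int) : Prop :=
  s.toList.all (fun c => 97 ≤ c.toNat && c.toNat ≤ 122) = true ∧ 1 ≤ k
instance (s : String) (k : Int) : Decidable (Pre_equal_substring1 s k) := by
  unfold Pre_equal_substring1; infer_instance

def pvWitness_equal_substring1 : String × Int := ("abcba", 2)

def Spec_equal_substring1 (s : String) (k : Int) (out : Int) : Prop := out = equal_substring1_alt s k
instance (s : String) (k : Int) (out : Int) : Decidable (Spec_equal_substring1 s k out) := by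
  unfold Spec_equal_substring1; infer_instance

-- ===== CLAIM (what is proved, stated in full; the proofs are below) =====
def Claim_equal_equal_substring1 : Prop := ∀ (s : String) (k : Int), Dom_equal_substring1 s k → Pre_equal_substring1 s k → Spec_equal_substring1 s k (equal_substring1 s k)

-- ===== LEMMAS AND PROOFS =====

-- the window s[i:j], the code of a lowercase letter, the abstract value of A's cnt array,
-- and the number of distinct window characters (all window characters are 'a'..'z' under Pre_)
def eqsWin (l : List Char) (i j : Nat) : List Char := (l.drop i).take (j - i)
def eqsCode (d : Nat) : Char := Char.ofNat (97 + d)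
def eqsCnt (l : List Char) (i j : Nat) : List Int :=
  (List.range 26).map (fun d => ((eqsWin l i j).count (eqsCode d) : Int))
def eqsDis (l : List Char) (i j : Nat) : Int :=
  ((List.range 26).countP (fun d => (eqsWin l i j).count (eqsCode d) ≠ 0) : Int)

def eqsLC (l : List Char) : Prop := ∀ c ∈ l, 97 ≤ c.toNat ∧ c.toNat ≤ 122

-- last occurrence of c in l before position m (B's dict stores these)
def eqsLOcc (l : List Char) (m : Nat) (c : Char) : Option Nat :=
  (List.range m).reverse.find? (fun i => l.getD i ' ' == c)

-- B's dict characterization: key c present iff c occurs in the window s[L:m], value = last occurrence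
-- the dict value stored for a last occurrence o, seen from left edge L
def eqsBVal (L : Nat) (o : Option Nat) : Option Int :=
  match o with
  | some idx => if L ≤ idx then some ((idx : Nat) : Int) else none
  | none => none

def eqsBChar (l : List Char) (m L : Nat) (d : PySem.Dict Char Int) : Prop :=
  ∀ c, d.get? c = eqsBVal L (eqsLOcc l m c)

-- fiber counts: cA i = #{j : substring s[i:j] nonempty with ≤ k distinct} (A's per-i term),
-- cB r = #{i : substring s[i:r+1] nonempty with ≤ k distinct} (B's per-r term)
def eqsCA (l : List Char) (k : Int) (i : Nat) : Nat :=
  ((Finset.range (l.length + 1)).filter (fun j => i < j ∧ eqsDis l i j ≤ k)).card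
def eqsCB (l : List Char) (k : Int) (r : Nat) : Nat :=
  ((Finset.range l.length).filter (fun i => i ≤ r ∧ eqsDis l i (r + 1) ≤ k)).card

-- the loop bodies of the two ports, named for the outer inductions (syntactically the bodies
-- of the folds in the ports, so the bridge is rfl)
def eqsStepA (l : List Char) (k : Int) (st : Nat × List Int × Int) (i : Nat) : Nat × List Int × Int :=
  let (j, cnt, res) := st
  let (j', cnt') := eqsA_inner l k cnt j (l.length - j)
  let res' := res + ((j' : Int) - (i : Int))
  let e : Int := ((l.getD i ' ').toNat : Int) - 97
  (j', PySem.List.pySetD cnt' e (PySem.List.pyGetD cnt' e 0 - 1), res')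

def eqsStepB (l : List Char) (k : Int) (st : PySem.Dict Char Int × Int × Int) (r : Nat) :
    PySem.Dict Char Int × Int × Int :=
  let (last, left, res) := st
  let last1 := last.insert (l.getD r ' ') ((r : Nat) : Int)
  let p : PySem.Dict Char Int × Int :=
    if k < (last1.size : Int) then
      let m := (PySem.List.min? last1.values (fun v => v)).getD 0
      (last1.erase (PySem.List.pyGetD l m ' '), m + 1)
    else (last1, left)
  (p.1, p.2, res + (r : Int) - p.2 + 1)

-- A's count_distinct over the abstract cnt array is the distinct count of the window
theorem eqs_cd_eq (l : List Char) (i j : Nat) : eqsA_cd (eqsCnt l i j) = eqsDis l i j := by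
  unfold eqsA_cd eqsCnt eqsDis
  rw [PySem.List.foldl_ite_add_one, List.countP_map]
  norm_num
  apply List.countP_congr
  intro a _
  simp

theorem eqs_code_toNat (d : ℕ) (h : d < 26) : (eqsCode d).toNat = 97 + d := by
  have hv : (97 + d).isValidChar := Or.inl (by omega)
  unfold eqsCode
  rw [Char.toNat_ofNat, if_pos hv]

theorem eqs_code_of_lc (c : Char) (h1 : 97 ≤ c.toNat) (h2 : c.toNat ≤ 122) :
    eqsCode (c.toNat - 97) = c := by
  unfold eqsCode
  have : 97 + (c.toNat - 97) = c.toNat := by omega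
  rw [this, Char.ofNat_toNat]

theorem eqs_code_eq_iff (d : ℕ) (hd : d < 26) (c : Char) (h1 : 97 ≤ c.toNat) (h2 : c.toNat ≤ 122) :
    eqsCode d = c ↔ d = c.toNat - 97 := by
  constructor
  · intro h
    have := eqs_code_toNat d hd
    rw [h] at this; omega
  · intro h; subst h; exact eqs_code_of_lc c h1 h2

theorem eqs_win_self (l : List Char) (i : Nat) : eqsWin l i i = [] := by
  simp [eqsWin]

theorem eqs_dis_self (l : List Char) (i : Nat) : eqsDis l i i = 0 := by
  simp [eqsDis, eqs_win_self]

theorem eqs_win_succ (l : List Char) (i j : Nat) (hij : i ≤ j) (hj : j < l.length) :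
    eqsWin l i (j + 1) = eqsWin l i j ++ [l[j]] := by
  unfold eqsWin
  have h1 : j + 1 - i = (j - i) + 1 := by omega
  rw [h1, List.take_succ]
  congr 1
  rw [List.getElem?_drop]
  have h2 : i + (j - i) = j := by omega
  rw [h2]
  simp [hj]

theorem eqs_win_cons (l : List Char) (i j : Nat) (hij : i < j) (hj : j ≤ l.length) :
    eqsWin l i j = l[i]'(by omega) :: eqsWin l (i + 1) j := by
  unfold eqsWin
  rw [List.drop_eq_getElem_cons (by omega)]
  have h1 : j - i = (j - (i + 1)) + 1 := by omega
  rw [h1, List.take_succ_cons]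

-- reading cnt[ord(c) - 97] on the abstract array
theorem eqs_cnt_get (l : List Char) (i j : Nat) (c : Char) (h1 : 97 ≤ c.toNat) (h2 : c.toNat ≤ 122) :
    PySem.List.pyGetD (eqsCnt l i j) ((c.toNat : Int) - 97) 0 = ((eqsWin l i j).count c : Int) := by
  have he : ((c.toNat : Int) - 97) = ((c.toNat - 97 : Nat) : Int) := by omega
  rw [he, PySem.List.pyGetD_natCast]
  unfold eqsCnt
  have hd : c.toNat - 97 < 26 := by omega
  rw [List.getD_eq_getElem _ _ (by simpa using hd)]
  simp [eqs_code_of_lc c h1 h2]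

-- writing cnt[ord(c) - 97] := v on the abstract array
theorem eqs_cnt_set (l : List Char) (i j : Nat) (c : Char) (h1 : 97 ≤ c.toNat) (h2 : c.toNat ≤ 122)
    (v : Int) :
    PySem.List.pySetD (eqsCnt l i j) ((c.toNat : Int) - 97) v =
      (List.range 26).map (fun d => if d = c.toNat - 97 then v else ((eqsWin l i j).count (eqsCode d) : Int)) := by
  have he : ((c.toNat : Int) - 97) = ((c.toNat - 97 : Nat) : Int) := by omega
  rw [he, PySem.List.pySetD_natCast]
  unfold eqsCnt
  apply List.ext_getElem (by simp)
  intro a ha1 ha2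
  simp only [List.getElem_set, List.getElem_map, List.getElem_range]
  split_ifs <;> first | rfl | omega

-- countP over range 26 changes by exactly one when position d0 flips from false to true
theorem eqs_countP_flip (m d0 : ℕ) (p q : ℕ → Bool) (hd : d0 < m) (hp : p d0 = false)
    (hq : q d0 = true) (h : ∀ d, d < m → d ≠ d0 → p d = q d) :
    (List.range m).countP q = (List.range m).countP p + 1 := by
  induction m with
  | zero => omega
  | succ n ih =>
    rw [List.range_succ, List.countP_append, List.countP_append]
    by_cases hm : d0 = n
    · have hcong : (List.range n).countP q = (List.range n).countP p := by
        apply List.countP_congr; intro a ha; simp at ha; rw [h a (by omega) (by omega)]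
      rw [hcong, ← hm]
      simp [hp, hq]
    · have h2 : q n = p n := (h n (by omega) (by omega)).symm
      have h3 := ih (by omega) (fun d hdn hne => h d (by omega) hne)
      cases hpn : p n <;> simp [h2, h3, hpn] <;> omega

-- counts after appending l[j] to the window
theorem eqs_count_push (l : List Char) (i j : Nat) (hij : i ≤ j) (hj : j < l.length) (c : Char) :
    (eqsWin l i (j + 1)).count c = (eqsWin l i j).count c + (if c = l[j] then 1 else 0) := by
  rw [eqs_win_succ l i j hij hj, List.count_append]
  by_cases h : c = l[j]
  · simp [h]
  · simp [List.count_cons, h, Ne.symm h]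

-- counts after dropping l[i] from the window
theorem eqs_count_pop (l : List Char) (i j : Nat) (hij : i < j) (hj : j ≤ l.length) (c : Char) :
    (eqsWin l i j).count c = (eqsWin l (i + 1) j).count c + (if c = l[i]'(by omega) then 1 else 0) := by
  rw [eqs_win_cons l i j hij hj, List.count_cons]
  by_cases h : c = l[i]'(by omega)
  · simp [h]
  · simp [h, Ne.symm h]

theorem eqs_cnt_push (l : List Char) (i j : Nat) (hlc : eqsLC l) (hij : i ≤ j) (hj : j < l.length) :
    PySem.List.pySetD (eqsCnt l i j) (((l[j].toNat : Int)) - 97)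
        (PySem.List.pyGetD (eqsCnt l i j) (((l[j].toNat : Int)) - 97) 0 + 1) =
      eqsCnt l i (j + 1) := by
  obtain ⟨h1, h2⟩ := hlc l[j] (l.getElem_mem hj)
  rw [eqs_cnt_get l i j _ h1 h2, eqs_cnt_set l i j _ h1 h2]
  unfold eqsCnt
  apply List.map_congr_left
  intro d hd
  simp only [List.mem_range] at hd
  rw [eqs_count_push l i j hij hj]
  by_cases hcd : d = l[j].toNat - 97
  · subst hcd
    rw [if_pos rfl, eqs_code_of_lc _ h1 h2]
    simp
  · rw [if_neg hcd]
    have : ¬ eqsCode d = l[j] := by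
      rw [eqs_code_eq_iff d hd _ h1 h2]; exact hcd
    simp [this]

theorem eqs_dis_push_mem (l : List Char) (i j : Nat) (hlc : eqsLC l) (hij : i ≤ j)
    (hj : j < l.length) (hmem : 0 < (eqsWin l i j).count l[j]) :
    eqsDis l i (j + 1) = eqsDis l i j := by
  unfold eqsDis
  congr 1
  apply List.countP_congr
  intro d hd
  simp only [List.mem_range] at hd
  rw [eqs_count_push l i j hij hj]
  obtain ⟨h1, h2⟩ := hlc l[j] (l.getElem_mem hj)
  by_cases hcd : eqsCode d = l[j]
  · rw [hcd] at *
    simp; omega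
  · simp [hcd]

theorem eqs_dis_push_new (l : List Char) (i j : Nat) (hlc : eqsLC l) (hij : i ≤ j)
    (hj : j < l.length) (hmem : (eqsWin l i j).count l[j] = 0) :
    eqsDis l i (j + 1) = eqsDis l i j + 1 := by
  obtain ⟨h1, h2⟩ := hlc l[j] (l.getElem_mem hj)
  unfold eqsDis
  have hflip := eqs_countP_flip 26 (l[j].toNat - 97)
    (fun d => decide ((eqsWin l i j).count (eqsCode d) ≠ 0))
    (fun d => decide ((eqsWin l i (j+1)).count (eqsCode d) ≠ 0))
    (by omega)
    (by simp [eqs_code_of_lc _ h1 h2, hmem])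
    (by
      simp only [decide_eq_true_eq, eqs_code_of_lc _ h1 h2]
      rw [eqs_count_push l i j hij hj]
      simp)
    (by
      intro d hd26 hd
      simp only [decide_eq_decide]
      rw [eqs_count_push l i j hij hj]
      have : ¬ eqsCode d = l[j] := by
        rw [eqs_code_eq_iff d hd26 _ h1 h2]; exact hd
      simp [this])
  rw [hflip]
  push_cast
  ring

theorem eqs_cnt_pop (l : List Char) (i j : Nat) (hlc : eqsLC l) (hij : i < j) (hj : j ≤ l.length) :
    PySem.List.pySetD (eqsCnt l i j) (((l[i]'(by omega)).toNat : Int) - 97)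
        (PySem.List.pyGetD (eqsCnt l i j) (((l[i]'(by omega)).toNat : Int) - 97) 0 - 1) =
      eqsCnt l (i + 1) j := by
  have hi : i < l.length := by omega
  obtain ⟨h1, h2⟩ := hlc l[i] (l.getElem_mem hi)
  rw [eqs_cnt_get l i j _ h1 h2, eqs_cnt_set l i j _ h1 h2]
  unfold eqsCnt
  apply List.map_congr_left
  intro d hd
  simp only [List.mem_range] at hd
  by_cases hcd : d = l[i].toNat - 97
  · subst hcd
    rw [if_pos rfl, eqs_code_of_lc _ h1 h2]
    rw [eqs_count_pop l i j hij hj l[i]]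
    simp
  · rw [if_neg hcd]
    have hne : ¬ eqsCode d = l[i] := by
      rw [eqs_code_eq_iff d hd _ h1 h2]; exact hcd
    rw [eqs_count_pop l i j hij hj (eqsCode d)]
    simp [hne]

theorem eqs_dis_pop_mem (l : List Char) (i j : Nat) (hlc : eqsLC l) (hij : i < j)
    (hj : j ≤ l.length) (hmem : 0 < (eqsWin l (i + 1) j).count (l[i]'(by omega))) :
    eqsDis l (i + 1) j = eqsDis l i j := by
  unfold eqsDis
  congr 1
  apply List.countP_congr
  intro d hd
  simp only [List.mem_range] at hd
  rw [eqs_count_pop l i j hij hj]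
  have hi : i < l.length := by omega
  obtain ⟨h1, h2⟩ := hlc l[i] (l.getElem_mem hi)
  by_cases hcd : eqsCode d = l[i]
  · rw [hcd] at *
    simp; omega
  · simp [hcd]

theorem eqs_dis_pop_last (l : List Char) (i j : Nat) (hlc : eqsLC l) (hij : i < j)
    (hj : j ≤ l.length) (hmem : (eqsWin l (i + 1) j).count (l[i]'(by omega)) = 0) :
    eqsDis l (i + 1) j = eqsDis l i j - 1 := by
  have hi : i < l.length := by omega
  obtain ⟨h1, h2⟩ := hlc l[i] (l.getElem_mem hi)
  unfold eqsDis
  have hflip := eqs_countP_flip 26 (l[i].toNat - 97)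
    (fun d => decide ((eqsWin l (i+1) j).count (eqsCode d) ≠ 0))
    (fun d => decide ((eqsWin l i j).count (eqsCode d) ≠ 0))
    (by omega)
    (by simp [eqs_code_of_lc _ h1 h2, hmem])
    (by
      simp only [decide_eq_true_eq, eqs_code_of_lc _ h1 h2]
      rw [eqs_count_pop l i j hij hj]
      simp [hmem])
    (by
      intro d hd26 hd
      simp only [decide_eq_decide]
      rw [eqs_count_pop l i j hij hj]
      have : ¬ eqsCode d = l[i] := by
        rw [eqs_code_eq_iff d hd26 _ h1 h2]; exact hd
      simp [this])
  rw [hflip]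
  push_cast
  ring

-- lookup after erase on a PySem dict (no such lemma in the prelude)
theorem eqs_get?_erase {κ ν : Type} [BEq κ] [LawfulBEq κ] (d : PySem.Dict κ ν) (a b : κ) :
    (d.erase a).get? b = if b == a then none else d.get? b := by
  obtain ⟨items⟩ := d
  simp only [PySem.Dict.erase, PySem.Dict.get?]
  induction items with
  | nil => cases h : (b == a) <;> simp [h]
  | cons p rest ih =>
    rw [List.filter_cons]
    by_cases hpa : p.1 = a
    · by_cases hba : b = a
      · simp_all [List.find?_cons, beq_iff_eq]
      · have hab : (a == b) = false := by simp; intro h; exact hba h.symm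
        simp_all [List.find?_cons, beq_iff_eq]
    · by_cases hba : b = a
      · simp_all [List.find?_cons, beq_iff_eq]
      · cases hpb : (p.1 == b) <;> simp_all [List.find?_cons, beq_iff_eq]

-- erasing a key keeps the keys unique (no such lemma in the prelude)
theorem eqs_nodup_erase {κ ν : Type} [BEq κ] (d : PySem.Dict κ ν) (a : κ)
    (h : d.keys.Nodup) : (d.erase a).keys.Nodup := by
  obtain ⟨items⟩ := d
  simp only [PySem.Dict.erase, PySem.Dict.keys] at *
  exact List.Nodup.sublist (List.Sublist.map _ List.filter_sublist) h

-- ===== monotonicity of the distinct count in both window ends =====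

theorem eqs_dis_push_le (l : List Char) (hlc : eqsLC l) (i j : Nat) (hij : i ≤ j)
    (hj : j < l.length) :
    eqsDis l i j ≤ eqsDis l i (j + 1) ∧ eqsDis l i (j + 1) ≤ eqsDis l i j + 1 := by
  by_cases h : 0 < (eqsWin l i j).count l[j]
  · rw [eqs_dis_push_mem l i j hlc hij hj h]; omega
  · rw [eqs_dis_push_new l i j hlc hij hj (by omega)]; omega

theorem eqs_dis_pop_le (l : List Char) (hlc : eqsLC l) (i j : Nat) (hij : i < j)
    (hj : j ≤ l.length) : eqsDis l (i + 1) j ≤ eqsDis l i j := by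
  by_cases h : 0 < (eqsWin l (i + 1) j).count (l[i]'(by omega))
  · rw [eqs_dis_pop_mem l i j hlc hij hj h]
  · rw [eqs_dis_pop_last l i j hlc hij hj (by omega)]; omega

theorem eqs_dis_mono_j (l : List Char) (hlc : eqsLC l) (i j j' : Nat) (hij : i ≤ j)
    (hjj : j ≤ j') (hj' : j' ≤ l.length) : eqsDis l i j ≤ eqsDis l i j' := by
  have key : ∀ t, j + t ≤ l.length → eqsDis l i j ≤ eqsDis l i (j + t) := by
    intro t
    induction t with
    | zero => intro _; exact le_refl _
    | succ t iht =>
      intro ht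
      have h1 := iht (by omega)
      have h2 := (eqs_dis_push_le l hlc i (j + t) (by omega) (by omega)).1
      have e : j + (t + 1) = (j + t) + 1 := by omega
      rw [e]
      omega
  have := key (j' - j) (by omega)
  rwa [show j + (j' - j) = j' from by omega] at this

theorem eqs_dis_anti_i (l : List Char) (hlc : eqsLC l) (i i' j : Nat) (hii : i ≤ i')
    (hij : i' ≤ j) (hj : j ≤ l.length) : eqsDis l i' j ≤ eqsDis l i j := by
  have key : ∀ t, i + t ≤ j → eqsDis l (i + t) j ≤ eqsDis l i j := by
    intro t
    induction t with
    | zero => intro _; exact le_refl _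
    | succ t iht =>
      intro ht
      have h1 := iht (by omega)
      have h2 := eqs_dis_pop_le l hlc (i + t) j (by omega) hj
      have e : i + (t + 1) = (i + t) + 1 := by omega
      rw [e]
      omega
  have := key (i' - i) (by omega)
  rwa [show i + (i' - i) = i' from by omega] at this

-- ===== window membership and last occurrences =====

theorem eqs_win_mem_iff (l : List Char) (i j : Nat) (hj : j ≤ l.length) (c : Char) :
    c ∈ eqsWin l i j ↔ ∃ p, i ≤ p ∧ p < j ∧ l.getD p ' ' = c := by
  unfold eqsWin
  constructor
  · intro h
    obtain ⟨q, hq, he⟩ := List.getElem_of_mem h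
    have hq1 : q < j - i ∧ q < l.length - i := by
      have : q < min (j - i) (l.length - i) := by simpa using hq
      omega
    refine ⟨i + q, by omega, by omega, ?_⟩
    rw [List.getElem_take, List.getElem_drop] at he
    rw [List.getD_eq_getElem _ _ (by omega)]
    exact he
  · rintro ⟨p, h1, h2, h3⟩
    have hp : p < l.length := by omega
    rw [List.mem_iff_getElem]
    refine ⟨p - i, by simp; omega, ?_⟩
    rw [List.getElem_take, List.getElem_drop]
    have e : i + (p - i) = p := by omega
    rw [← h3, List.getD_eq_getElem _ _ hp]
    congr 1

theorem eqsLOcc_succ (l : List Char) (m : Nat) (c : Char) :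
    eqsLOcc l (m + 1) c = if l.getD m ' ' = c then some m else eqsLOcc l m c := by
  unfold eqsLOcc
  rw [List.range_succ, List.reverse_append]
  simp only [List.reverse_singleton, List.singleton_append, List.find?_cons]
  cases hb : (l.getD m ' ' == c)
  · have h' : ¬ l.getD m ' ' = c := by simpa using hb
    rw [if_neg h']
  · have h' : l.getD m ' ' = c := by simpa using hb
    rw [if_pos h']

theorem eqsLOcc_some (l : List Char) (c : Char) :
    ∀ m i, eqsLOcc l m c = some i →
      i < m ∧ l.getD i ' ' = c ∧ ∀ p, i < p → p < m → l.getD p ' ' ≠ c := by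
  intro m
  induction m with
  | zero => intro i h; simp [eqsLOcc] at h
  | succ m ih =>
    intro i h
    rw [eqsLOcc_succ] at h
    by_cases hm : l.getD m ' ' = c
    · rw [if_pos hm] at h
      obtain rfl : m = i := by injection h
      exact ⟨by omega, hm, fun p hp1 hp2 _ => by omega⟩
    · rw [if_neg hm] at h
      obtain ⟨h1, h2, h3⟩ := ih i h
      refine ⟨by omega, h2, fun p hp1 hp2 => ?_⟩
      by_cases hpm : p = m
      · rw [hpm]; exact hm
      · exact h3 p hp1 (by omega)

theorem eqsLOcc_exists (l : List Char) (c : Char) :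
    ∀ m p, p < m → l.getD p ' ' = c → ∃ i, eqsLOcc l m c = some i ∧ p ≤ i := by
  intro m
  induction m with
  | zero => intro p hp _; omega
  | succ m ih =>
    intro p hp hc
    rw [eqsLOcc_succ]
    by_cases hm : l.getD m ' ' = c
    · exact ⟨m, by rw [if_pos hm], by omega⟩
    · have hpm : p ≠ m := fun e => hm (e ▸ hc)
      obtain ⟨i, h1, h2⟩ := ih p (by omega) hc
      exact ⟨i, by rw [if_neg hm]; exact h1, h2⟩

theorem eqs_count_lOcc (l : List Char) (i m : Nat) (hm : m ≤ l.length) (c : Char) :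
    0 < (eqsWin l i m).count c ↔ ∃ idx, eqsLOcc l m c = some idx ∧ i ≤ idx := by
  rw [List.count_pos_iff, eqs_win_mem_iff l i m hm c]
  constructor
  · rintro ⟨p, h1, h2, h3⟩
    obtain ⟨idx, hidx, hpi⟩ := eqsLOcc_exists l c m p h2 h3
    exact ⟨idx, hidx, by omega⟩
  · rintro ⟨idx, hidx, hi⟩
    obtain ⟨h1, h2, _⟩ := eqsLOcc_some l c m idx hidx
    exact ⟨idx, hi, h1, h2⟩

-- ===== the dict's size is the window's distinct count =====

theorem eqs_countP_card (p : Nat → Bool) (m : Nat) :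
    (List.range m).countP p = ((Finset.range m).filter (fun i => p i = true)).card := by
  rw [List.countP_eq_length_filter]
  simp [Finset.card, Finset.filter, Finset.range, Multiset.range, Multiset.filter_coe]

theorem eqs_size_eq (d : PySem.Dict Char Int) (hnd : d.keys.Nodup)
    (hkeys : ∀ c ∈ d.keys, 97 ≤ c.toNat ∧ c.toNat ≤ 122) :
    d.size = (List.range 26).countP (fun dd => (d.get? (eqsCode dd)).isSome) := by
  have hmem : ∀ c : Char, c ∈ d.keys ↔ (d.get? c).isSome = true := by
    intro c
    constructor
    · intro h
      cases hg : d.get? c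
      · exact absurd h ((PySem.Dict.get?_eq_none_iff_not_mem_keys d c).mp hg)
      · simp
    · intro h
      by_contra hn
      rw [← PySem.Dict.get?_eq_none_iff_not_mem_keys d c] at hn
      rw [hn] at h
      simp at h
  have hsz : d.size = d.keys.length := by simp [PySem.Dict.size, PySem.Dict.keys]
  rw [hsz, eqs_countP_card, ← List.toFinset_card_of_nodup hnd]
  refine Finset.card_bij' (fun c _ => c.toNat - 97) (fun dd _ => eqsCode dd) ?_ ?_ ?_ ?_
  · intro c hc
    rw [List.mem_toFinset] at hc
    obtain ⟨h1, h2⟩ := hkeys c hc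
    simp only [Finset.mem_filter, Finset.mem_range]
    refine ⟨by omega, ?_⟩
    rw [eqs_code_of_lc c h1 h2]
    exact (hmem c).mp hc
  · intro dd hdd
    rw [Finset.mem_filter] at hdd
    rw [List.mem_toFinset]
    exact (hmem _).mpr hdd.2
  · intro c hc
    rw [List.mem_toFinset] at hc
    obtain ⟨h1, h2⟩ := hkeys c hc
    exact eqs_code_of_lc c h1 h2
  · intro dd hdd
    rw [Finset.mem_filter, Finset.mem_range] at hdd
    show (eqsCode dd).toNat - 97 = dd
    rw [eqs_code_toNat dd hdd.1]
    omega

theorem eqs_dict_size_dis (l : List Char) (L m : Nat) (d : PySem.Dict Char Int)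
    (hnd : d.keys.Nodup) (hkeys : ∀ c ∈ d.keys, 97 ≤ c.toNat ∧ c.toNat ≤ 122)
    (hsome : ∀ c : Char, (d.get? c).isSome = true ↔ 0 < (eqsWin l L m).count c) :
    (d.size : Int) = eqsDis l L m := by
  rw [eqs_size_eq d hnd hkeys]
  unfold eqsDis
  norm_cast
  apply List.countP_congr
  intro dd _
  by_cases hpos : 0 < (eqsWin l L m).count (eqsCode dd)
  · have h1 := (hsome (eqsCode dd)).mpr hpos
    simp [h1, Nat.pos_iff_ne_zero.mp hpos]
  · have h1 : ((d.get? (eqsCode dd)).isSome) = false := by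
      cases h : (d.get? (eqsCode dd)).isSome
      · rfl
      · exact absurd ((hsome _).mp h) hpos
    have h2 : (eqsWin l L m).count (eqsCode dd) = 0 := by omega
    simp [h1, h2]

-- ===== fiber identities =====

theorem eqs_fiberA (l : List Char) (k : Int) (hlc : eqsLC l) (m j' : Nat) (h1 : m ≤ j')
    (h2 : j' ≤ l.length) (h3 : eqsDis l m j' ≤ k) (h4 : j' < l.length → k < eqsDis l m (j' + 1)) :
    (Finset.range (l.length + 1)).filter (fun j => m < j ∧ eqsDis l m j ≤ k) = Finset.Ioc m j' := by
  ext j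
  simp only [Finset.mem_filter, Finset.mem_range, Finset.mem_Ioc]
  constructor
  · rintro ⟨hjr, hmj, hdj⟩
    refine ⟨hmj, ?_⟩
    by_contra hgt
    push_neg at hgt
    have hj'n : j' < l.length := by omega
    have hmono := eqs_dis_mono_j l hlc m (j' + 1) j (by omega) (by omega) (by omega)
    have := h4 hj'n
    omega
  · rintro ⟨hmj, hjj⟩
    refine ⟨by omega, hmj, ?_⟩
    have := eqs_dis_mono_j l hlc m j j' (by omega) hjj h2
    omega

theorem eqs_fiberB (l : List Char) (k : Int) (hlc : eqsLC l) (L r : Nat) (hr : r < l.length)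
    (hL : L ≤ r + 1) (h1 : eqsDis l L (r + 1) ≤ k) (h2 : L = 0 ∨ k < eqsDis l (L - 1) (r + 1)) :
    (Finset.range l.length).filter (fun i => i ≤ r ∧ eqsDis l i (r + 1) ≤ k) = Finset.Icc L r := by
  ext i
  simp only [Finset.mem_filter, Finset.mem_range, Finset.mem_Icc]
  constructor
  · rintro ⟨hin, hir, hdis⟩
    refine ⟨?_, hir⟩
    by_contra hlt
    push_neg at hlt
    rcases h2 with h0 | hgt
    · omega
    · have := eqs_dis_anti_i l hlc i (L - 1) (r + 1) (by omega) (by omega) (by omega)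
      omega
  · rintro ⟨hLi, hir⟩
    refine ⟨by omega, hir, ?_⟩
    have := eqs_dis_anti_i l hlc L i (r + 1) hLi (by omega) (by omega)
    omega

-- ===== A: the inner while loop reaches exactly the maximal admissible right end =====

theorem eqsA_inner_char (l : List Char) (k : Int) (i : Nat) (hlc : eqsLC l) (hk : 1 ≤ k) :
    ∀ fuel j, i ≤ j → j ≤ l.length → l.length ≤ j + fuel → eqsDis l i j ≤ k →
    ∃ j', eqsA_inner l k (eqsCnt l i j) j fuel = (j', eqsCnt l i j') ∧
      j ≤ j' ∧ j' ≤ l.length ∧ eqsDis l i j' ≤ k ∧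
      (j' < l.length → k < eqsDis l i (j' + 1)) ∧ (i < l.length → i < j') := by
  intro fuel
  induction fuel with
  | zero =>
    intro j h1 h2 h3 h4
    have hj : j = l.length := by omega
    exact ⟨j, rfl, le_refl j, h2, h4, by omega, by omega⟩
  | succ fuel ih =>
    intro j h1 h2 h3 h4
    by_cases hj : j < l.length
    · obtain ⟨hc1, hc2⟩ := hlc l[j] (l.getElem_mem hj)
      have hgd : l.getD j ' ' = l[j] := List.getD_eq_getElem _ _ hj
      have hget := eqs_cnt_get l i j l[j] hc1 hc2
      by_cases hwc : 0 < (eqsWin l i j).count l[j]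
      · have hstep : eqsA_inner l k (eqsCnt l i j) j (fuel + 1) =
            eqsA_inner l k (eqsCnt l i (j + 1)) (j + 1) fuel := by
          rw [eqsA_inner, if_pos hj]
          simp only [hgd, eqs_cd_eq, hget]
          by_cases hdk : eqsDis l i j = k
          · rw [if_pos hdk, if_pos (by exact_mod_cast Nat.pos_iff_ne_zero.mp hwc)]
            rw [← hget, eqs_cnt_push l i j hlc h1 hj]
          · rw [if_neg hdk, if_pos (lt_of_le_of_ne h4 hdk)]
            rw [← hget, eqs_cnt_push l i j hlc h1 hj]
        have hdis1 : eqsDis l i (j + 1) = eqsDis l i j := eqs_dis_push_mem l i j hlc h1 hj hwc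
        obtain ⟨j', hrec, hp1, hp2, hp3, hp4, hp5⟩ :=
          ih (j + 1) (by omega) (by omega) (by omega) (by omega)
        exact ⟨j', by rw [hstep, hrec], by omega, hp2, hp3, hp4, fun _ => by omega⟩
      · have hwc0 : (eqsWin l i j).count l[j] = 0 := by omega
        by_cases hdk : eqsDis l i j = k
        · have hij : i < j := by
            rcases Nat.lt_or_ge i j with h | h
            · exact h
            · exfalso
              have he : i = j := by omega
              rw [← he, eqs_dis_self] at hdk
              omega
          refine ⟨j, ?_, le_refl j, h2, h4, ?_, fun _ => hij⟩
          · rw [eqsA_inner, if_pos hj]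
            simp only [hgd, eqs_cd_eq, hget, hwc0]
            rw [if_pos hdk]
            simp
          · intro _
            rw [eqs_dis_push_new l i j hlc h1 hj hwc0]
            omega
        · have hdlt : eqsDis l i j < k := lt_of_le_of_ne h4 hdk
          have hstep : eqsA_inner l k (eqsCnt l i j) j (fuel + 1) =
              eqsA_inner l k (eqsCnt l i (j + 1)) (j + 1) fuel := by
            rw [eqsA_inner, if_pos hj]
            simp only [hgd, eqs_cd_eq, hget]
            rw [if_neg hdk, if_pos hdlt]
            rw [← hget, eqs_cnt_push l i j hlc h1 hj]
          have hdis1 : eqsDis l i (j + 1) = eqsDis l i j + 1 :=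
            eqs_dis_push_new l i j hlc h1 hj hwc0
          obtain ⟨j', hrec, hp1, hp2, hp3, hp4, hp5⟩ :=
            ih (j + 1) (by omega) (by omega) (by omega) (by omega)
          exact ⟨j', by rw [hstep, hrec], by omega, hp2, hp3, hp4, fun _ => by omega⟩
    · have hjn : j = l.length := by omega
      refine ⟨j, ?_, le_refl j, h2, h4, by omega, by omega⟩
      rw [eqsA_inner, if_neg hj]

-- ===== A: the outer loop accumulates the left-anchored fiber counts =====

theorem eqsA_outer (l : List Char) (k : Int) (hlc : eqsLC l) (hk : 1 ≤ k) :
    ∀ m, m ≤ l.length →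
    ∃ j, (List.range m).foldl (eqsStepA l k) (0, List.replicate 26 (0 : Int), (0 : Int)) =
        (j, eqsCnt l m j, (((Finset.range m).sum (eqsCA l k) : ℕ) : Int)) ∧
      m ≤ j ∧ j ≤ l.length ∧ eqsDis l m j ≤ k := by
  intro m
  induction m with
  | zero =>
    intro _
    refine ⟨0, ?_, le_refl 0, Nat.zero_le _, by rw [eqs_dis_self]; omega⟩
    simp only [List.range_zero, List.foldl_nil, Finset.range_zero, Finset.sum_empty,
      Nat.cast_zero]
    have hcnt : eqsCnt l 0 0 = List.replicate 26 (0 : Int) := by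
      unfold eqsCnt
      rw [eqs_win_self]
      apply List.ext_getElem <;> simp
    rw [hcnt]
  | succ m ih =>
    intro hm1
    obtain ⟨j, hfold, hmj, hjn, hdis⟩ := ih (by omega)
    have hml : m < l.length := by omega
    obtain ⟨j', hinner, hjj', hj'n, hd1, hd2, hd3⟩ :=
      eqsA_inner_char l k m hlc hk (l.length - j) j hmj hjn (by omega) hdis
    have hmj' : m < j' := hd3 hml
    have hgd : l.getD m ' ' = l[m] := List.getD_eq_getElem _ _ hml
    rw [List.range_succ, List.foldl_append, hfold]
    simp only [List.foldl_cons, List.foldl_nil]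
    have hcA : eqsCA l k m = j' - m := by
      unfold eqsCA
      rw [eqs_fiberA l k hlc m j' (by omega) hj'n hd1 hd2]
      exact Nat.card_Ioc m j'
    have hres : (((Finset.range m).sum (eqsCA l k) : ℕ) : Int) + ((j' : Int) - (m : Int)) =
        (((Finset.range (m + 1)).sum (eqsCA l k) : ℕ) : Int) := by
      rw [Finset.sum_range_succ, hcA]
      push_cast [Nat.cast_sub (le_of_lt hmj')]
      ring
    refine ⟨j', ?_, by omega, hj'n, ?_⟩
    · unfold eqsStepA
      simp only [hinner, hgd]
      rw [eqs_cnt_pop l m j' hlc hmj' hj'n, hres]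
    · have := eqs_dis_anti_i l hlc m (m + 1) j' (by omega) (by omega) hj'n
      omega

-- ===== B: one step of the right-anchored scan =====

theorem eqsB_step_main (l : List Char) (k : Int) (hlc : eqsLC l) (hk : 1 ≤ k) (r : Nat)
    (hr : r < l.length) (last : PySem.Dict Char Int) (L : Nat) (res : Int)
    (hL : L ≤ r) (hnd : last.keys.Nodup) (hchar : eqsBChar l r L last)
    (hdis : eqsDis l L r ≤ k) (hbd : L = 0 ∨ k < eqsDis l (L - 1) r) :
    ∃ last' L', eqsStepB l k (last, ((L : Nat) : Int), res) r =
        (last', ((L' : Nat) : Int), res + ((eqsCB l k r : Nat) : Int)) ∧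
      L' ≤ r + 1 ∧ last'.keys.Nodup ∧ eqsBChar l (r + 1) L' last' ∧
      eqsDis l L' (r + 1) ≤ k ∧ (L' = 0 ∨ k < eqsDis l (L' - 1) (r + 1)) := by
  have hgd : l.getD r ' ' = l[r] := List.getD_eq_getElem _ _ hr
  set c : Char := l.getD r ' ' with hc
  set last1 : PySem.Dict Char Int := last.insert c ((r : Nat) : Int) with hlast1
  -- characterization of the dict after the insert, for the unchanged left edge L
  have hchar1 : eqsBChar l (r + 1) L last1 := by
    intro c'
    rw [hlast1, PySem.Dict.get?_insert, eqsLOcc_succ, ← hc]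
    by_cases hcc : c' = c
    · subst hcc
      rw [if_pos rfl, if_pos rfl]
      simp [eqsBVal, hL]
    · rw [if_neg hcc, if_neg (fun h => hcc h.symm)]
      exact hchar c'
  have hnd1 : last1.keys.Nodup := PySem.Dict.nodup_keys_insert last c ((r : Nat) : Int) hnd
  have hsome1 : ∀ c' : Char, (last1.get? c').isSome = true ↔ 0 < (eqsWin l L (r + 1)).count c' := by
    intro c'
    rw [hchar1 c', eqs_count_lOcc l L (r + 1) (by omega) c']
    cases h : eqsLOcc l (r + 1) c'
    · simp [eqsBVal]
    · rename_i idx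
      by_cases hLi : L ≤ idx
      · simp [eqsBVal, hLi]
      · simp [eqsBVal, hLi]
  have hkeys1 : ∀ c' ∈ last1.keys, 97 ≤ c'.toNat ∧ c'.toNat ≤ 122 := by
    intro c' hk'
    have hs : (last1.get? c').isSome = true := by
      cases hg : last1.get? c'
      · exact absurd hk' ((PySem.Dict.get?_eq_none_iff_not_mem_keys last1 c').mp hg)
      · simp
    have hpos := (hsome1 c').mp hs
    rw [List.count_pos_iff] at hpos
    have hmem : c' ∈ l := List.mem_of_mem_drop (List.mem_of_mem_take hpos)
    exact hlc c' hmem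
  have hsize : (last1.size : Int) = eqsDis l L (r + 1) :=
    eqs_dict_size_dis l L (r + 1) last1 hnd1 hkeys1 hsome1
  by_cases hover : k < eqsDis l L (r + 1)
  · -- overflow: evict the minimum last occurrence
    have hkc : last1.get? c = some ((r : Nat) : Int) := by
      rw [hlast1, PySem.Dict.get?_insert]
      simp
    have hvne : last1.values ≠ [] := by
      intro hnil
      have hmemi := PySem.Dict.mem_items_of_get?_eq_some last1 hkc
      have : ((r : Nat) : Int) ∈ last1.values := by
        simp only [PySem.Dict.values, List.mem_map]
        exact ⟨(c, ((r : Nat) : Int)), hmemi, rfl⟩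
      rw [hnil] at this
      simp at this
    obtain ⟨m0, hm0⟩ : ∃ m0, PySem.List.min? last1.values (fun v => v) = some m0 := by
      cases h : PySem.List.min? last1.values (fun v => v)
      · exact absurd ((PySem.List.min?_eq_none_iff last1.values (fun v => v)).mp h) hvne
      · exact ⟨_, rfl⟩
    have hm0min : ∀ y ∈ last1.values, m0 ≤ y := PySem.List.min?_isMin hm0
    -- every lookup yields a last occurrence ≥ m0
    have hval : ∀ c' idx, last1.get? c' = some idx →
        ∃ ix : Nat, idx = ((ix : Nat) : Int) ∧ eqsLOcc l (r + 1) c' = some ix ∧ L ≤ ix ∧ m0 ≤ idx := by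
      intro c' idx hgc
      have hmemv : idx ∈ last1.values := by
        simp only [PySem.Dict.values, List.mem_map]
        exact ⟨(c', idx), PySem.Dict.mem_items_of_get?_eq_some last1 hgc, rfl⟩
      have hge := hm0min idx hmemv
      have hcc := hchar1 c'
      rw [hgc] at hcc
      cases h' : eqsLOcc l (r + 1) c'
      · rw [h'] at hcc; simp [eqsBVal] at hcc
      · rename_i ix
        rw [h'] at hcc
        simp only [eqsBVal] at hcc
        by_cases hLi : L ≤ ix
        · rw [if_pos hLi] at hcc
          injection hcc with he
          exact ⟨ix, he, rfl, hLi, hge⟩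
        · rw [if_neg hLi] at hcc
          exact absurd hcc (by simp)
    -- the minimum is itself a value: find its key c0 and index idx0
    have hm0memv : m0 ∈ last1.values := PySem.List.min?_mem hm0
    obtain ⟨p0, hp0mem, hp0v⟩ : ∃ p ∈ last1.items, p.2 = m0 := by
      simpa only [PySem.Dict.values, List.mem_map] using hm0memv
    have hg0 : last1.get? p0.1 = some m0 := by
      rw [← hp0v]
      exact PySem.Dict.get?_of_mem_items last1 hp0mem hnd1
    obtain ⟨idx0, hm0e, hocc0, hLidx0, _⟩ := hval p0.1 m0 hg0
    set c0 : Char := p0.1 with hc0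
    obtain ⟨hidx0r, hgd0, hlater0⟩ := eqsLOcc_some l c0 (r + 1) idx0 hocc0
    -- uniqueness of the key holding idx0
    have huniq : ∀ c', eqsLOcc l (r + 1) c' = some idx0 → c' = c0 := by
      intro c' h'
      obtain ⟨_, hgd', _⟩ := eqsLOcc_some l c' (r + 1) idx0 h'
      rw [← hgd', hgd0]
    -- eqsDis l idx0 (r+1) = k + 1
    have hub : eqsDis l L (r + 1) ≤ eqsDis l L r + 1 :=
      (eqs_dis_push_le l hlc L r hL hr).2
    have hEq1 : eqsDis l L (r + 1) = k + 1 := by omega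
    have hmono2 : eqsDis l L (r + 1) ≤ eqsDis l idx0 (r + 1) := by
      unfold eqsDis
      have hcp : (List.range 26).countP (fun d => (eqsWin l L (r + 1)).count (eqsCode d) ≠ 0) ≤
          (List.range 26).countP (fun d => (eqsWin l idx0 (r + 1)).count (eqsCode d) ≠ 0) := by
        apply List.countP_mono_left
        intro dd _ hdd
        simp only [decide_eq_true_eq] at hdd ⊢
        have hpos : 0 < (eqsWin l L (r + 1)).count (eqsCode dd) := by omega
        have hs := (hsome1 (eqsCode dd)).mpr hpos
        obtain ⟨idx, hgc⟩ := Option.isSome_iff_exists.mp hs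
        obtain ⟨ix, hixe, hocc', _, hgem0⟩ := hval (eqsCode dd) idx hgc
        have hixge : idx0 ≤ ix := by
          rw [hm0e] at hgem0
          rw [hixe] at hgem0
          exact_mod_cast hgem0
        have := (eqs_count_lOcc l idx0 (r + 1) (by omega) (eqsCode dd)).mpr ⟨ix, hocc', hixge⟩
        omega
      exact_mod_cast hcp
    have hub2 : eqsDis l idx0 (r + 1) ≤ eqsDis l L (r + 1) :=
      eqs_dis_anti_i l hlc L idx0 (r + 1) hLidx0 (by omega) (by omega)
    have hEq2 : eqsDis l idx0 (r + 1) = k + 1 := by omega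
    -- c0 does not occur after idx0, so dropping it loses exactly one distinct character
    have hc0count : (eqsWin l (idx0 + 1) (r + 1)).count c0 = 0 := by
      by_contra h
      have hpos : 0 < (eqsWin l (idx0 + 1) (r + 1)).count c0 := by omega
      obtain ⟨ix, hocc', hge⟩ := (eqs_count_lOcc l (idx0 + 1) (r + 1) (by omega) c0).mp hpos
      rw [hocc0] at hocc'
      injection hocc' with he
      omega
    have hgetElem0 : l[idx0]'(by omega) = c0 := by
      rw [← hgd0, List.getD_eq_getElem _ _ (by omega)]
    have hEq3 : eqsDis l (idx0 + 1) (r + 1) = k := by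
      have := eqs_dis_pop_last l idx0 (r + 1) hlc (by omega) (by omega)
        (by rw [hgetElem0]; exact hc0count)
      omega
    -- dict characterization after the erase, for the new left edge idx0 + 1
    have hchar2 : eqsBChar l (r + 1) (idx0 + 1) (last1.erase c0) := by
      intro c'
      rw [eqs_get?_erase]
      by_cases hcc : c' = c0
      · subst hcc
        rw [if_pos (by simp)]
        rw [hocc0]
        simp only [eqsBVal]
        rw [if_neg (by omega)]
      · rw [if_neg (by simpa using hcc)]
        rw [hchar1 c']
        cases h' : eqsLOcc l (r + 1) c'
        · rfl
        · rename_i idx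
          simp only [eqsBVal]
          by_cases hLi : L ≤ idx
          · rw [if_pos hLi]
            have hg' : last1.get? c' = some ((idx : Nat) : Int) := by
              rw [hchar1 c', h']
              simp only [eqsBVal]
              rw [if_pos hLi]
            obtain ⟨ix, hixe, hocc', _, hgem0⟩ := hval c' _ hg'
            have hix : ix = idx := by
              rw [h'] at hocc'
              injection hocc' with he
              omega
            subst hix
            have hge : idx0 ≤ ix := by
              rw [hm0e] at hgem0
              exact_mod_cast hgem0
            have hne : ix ≠ idx0 := by
              intro he
              exact hcc (huniq c' (he ▸ h'))
            rw [if_pos (by omega)]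
          · rw [if_neg hLi, if_neg (by omega)]
    have hnd2 : (last1.erase c0).keys.Nodup := eqs_nodup_erase last1 c0 hnd1
    -- value of the port's step
    have hidx0le : idx0 ≤ r := by omega
    refine ⟨last1.erase c0, idx0 + 1, ?_, by omega, hnd2, hchar2, by omega,
      Or.inr (by simpa using by omega : k < eqsDis l (idx0 + 1 - 1) (r + 1))⟩
    · have hcB : eqsCB l k r = r - idx0 := by
        unfold eqsCB
        rw [eqs_fiberB l k hlc (idx0 + 1) r hr (by omega) (by omega)
          (Or.inr (by simpa using by omega : k < eqsDis l (idx0 + 1 - 1) (r + 1)))]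
        rw [Nat.card_Icc]
        omega
      unfold eqsStepB
      simp only [← hc, ← hlast1]
      rw [if_pos (by rw [hsize]; exact hover), hm0]
      simp only [Option.getD_some, hm0e, PySem.List.pyGetD_natCast]
      rw [List.getD_eq_getElem _ _ (by omega : idx0 < l.length), hgetElem0]
      have hresv : res + (r : Int) - (((idx0 : Nat) : Int) + 1) + 1 =
          res + ((eqsCB l k r : Nat) : Int) := by
        rw [hcB]
        push_cast [Nat.cast_sub hidx0le]
        ring
      rw [show ((idx0 : Nat) : Int) + 1 = (((idx0 + 1 : Nat) : Nat) : Int) by push_cast; ring]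
      rw [← hresv]
      push_cast
      ring_nf
  · -- no overflow: the left edge stays
    have hdis1 : eqsDis l L (r + 1) ≤ k := by omega
    have hbd1 : L = 0 ∨ k < eqsDis l (L - 1) (r + 1) := by
      rcases hbd with h0 | hgt
      · exact Or.inl h0
      · refine Or.inr ?_
        have := eqs_dis_mono_j l hlc (L - 1) r (r + 1) (by omega) (by omega) (by omega)
        omega
    refine ⟨last1, L, ?_, by omega, hnd1, hchar1, hdis1, hbd1⟩
    have hcB : eqsCB l k r = r + 1 - L := by
      unfold eqsCB
      rw [eqs_fiberB l k hlc L r hr (by omega) hdis1 hbd1, Nat.card_Icc]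
    unfold eqsStepB
    simp only [← hc, ← hlast1]
    rw [if_neg (by rw [hsize]; omega)]
    have hresv : res + (r : Int) - ((L : Nat) : Int) + 1 = res + ((eqsCB l k r : Nat) : Int) := by
      rw [hcB]
      push_cast [Nat.cast_sub (by omega : L ≤ r + 1)]
      ring
    rw [← hresv]

-- ===== B: the outer loop accumulates the right-anchored fiber counts =====

theorem eqsB_outer (l : List Char) (k : Int) (hlc : eqsLC l) (hk : 1 ≤ k) :
    ∀ m, m ≤ l.length →
    ∃ last L, (List.range m).foldl (eqsStepB l k) (PySem.Dict.empty, 0, 0) =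
        (last, ((L : Nat) : Int), (((Finset.range m).sum (eqsCB l k) : ℕ) : Int)) ∧
      L ≤ m ∧ last.keys.Nodup ∧ eqsBChar l m L last ∧
      eqsDis l L m ≤ k ∧ (L = 0 ∨ k < eqsDis l (L - 1) m) := by
  intro m
  induction m with
  | zero =>
    intro _
    refine ⟨PySem.Dict.empty, 0, ?_, le_refl 0, ?_, ?_, by rw [eqs_dis_self]; omega, Or.inl rfl⟩
    · simp
    · exact PySem.Dict.nodup_keys_empty
    · intro c
      simp [eqsBChar, eqsLOcc, eqsBVal, PySem.Dict.get?_empty]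
  | succ m ih =>
    intro hm1
    obtain ⟨last, L, hfold, hLm, hnd, hchar, hdis, hbd⟩ := ih (by omega)
    have hml : m < l.length := by omega
    obtain ⟨last', L', hstep, hp1, hp2, hp3, hp4, hp5⟩ :=
      eqsB_step_main l k hlc hk m hml last L (((Finset.range m).sum (eqsCB l k) : ℕ) : Int)
        hLm hnd hchar hdis hbd
    refine ⟨last', L', ?_, hp1, hp2, hp3, hp4, hp5⟩
    rw [List.range_succ, List.foldl_append, hfold]
    simp only [List.foldl_cons, List.foldl_nil]
    rw [hstep, Finset.sum_range_succ]
    push_cast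
    ring_nf

-- ===== double counting: left-anchored fibers sum to right-anchored fibers =====

theorem eqs_sum_swap (l : List Char) (k : Int) :
    (Finset.range l.length).sum (eqsCA l k) = (Finset.range l.length).sum (eqsCB l k) := by
  unfold eqsCA eqsCB
  simp only [Finset.card_filter]
  rw [Finset.sum_comm, Finset.sum_range_succ']
  have h0 : (∑ i ∈ Finset.range l.length, if i < 0 ∧ eqsDis l i 0 ≤ k then 1 else 0) = 0 := by
    apply Finset.sum_eq_zero
    intro i _
    simp
  rw [h0, add_zero]
  apply Finset.sum_congr rfl
  intro r _
  apply Finset.sum_congr rfl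
  intro i _
  simp [Nat.lt_succ_iff]

-- ===== VERDICT (by name: the statement is the Claim_ definition above) =====
theorem equal_substring1_spec : Claim_equal_equal_substring1 := by
  intro s k _ hpre
  obtain ⟨hlc0, hk⟩ := hpre
  have hlc : eqsLC s.toList := by
    intro c hc
    simpa using List.all_eq_true.mp hlc0 c hc
  unfold Spec_equal_substring1
  have hA : equal_substring1 s k =
      ((List.range s.toList.length).foldl (eqsStepA s.toList k)
        (0, List.replicate 26 (0 : Int), (0 : Int))).2.2 := rfl
  have hB : equal_substring1_alt s k =
      ((List.range s.toList.length).foldl (eqsStepB s.toList k)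
        (PySem.Dict.empty, (0 : Int), (0 : Int))).2.2 := rfl
  obtain ⟨j, hFA, _, _, _⟩ := eqsA_outer s.toList k hlc hk s.toList.length (le_refl _)
  obtain ⟨last, L, hFB, _⟩ := eqsB_outer s.toList k hlc hk s.toList.length (le_refl _)
  rw [hA, hB, hFA, hFB]
  show (((Finset.range s.toList.length).sum (eqsCA s.toList k) : ℕ) : Int) =
    (((Finset.range s.toList.length).sum (eqsCB s.toList k) : ℕ) : Int)
  exact_mod_cast eqs_sum_swap s.toList k
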